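-- pv_equiv track=rewrite | github.com/isaac-oliveira/Pi-Text | text.py | getInitialAndFinal
-- ===== SOURCE A (Python) =====
-- def getInitialAndFinal(data):
--     aux = []
--     space = True
--     initial = 0
--     final = 0
--     for i, elem in enumerate(data):
--         sumElem = sum(elem)
--         if(space and sumElem != 0):
--             aux_i = i - 2
--             initial = aux_i
--             space = False
--         elif(not space and sumElem == 0):
--             final = i + 2
--             aux += [(initial, final)]
--             space = True
--
--     return aux
-- ===== SOURCE B (Python) =====
-- def getInitialAndFinal(data):
--     flags = [sum(e) != 0 for e in data]
--     prevs = [False] + flags[:-1]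
--     pairs = list(zip(prevs, flags))
--     starts = [i - 2 for i, (p, f) in enumerate(pairs) if f and not p]
--     ends = [i + 2 for i, (p, f) in enumerate(pairs) if p and not f]
--     return list(zip(starts, ends))
-- ===== Notes on version B (the rewrite author's own statement) =====
-- stated objective: alternative
-- what changed: A's single stateful pass with a space/initial mode flag is replaced by stateless comprehensions: compute the non-empty flag per row, zip the flag list with its one-step shift to find empty-to-non-empty starts and non-empty-to-empty ends, and pair them with zip (whose truncation drops a trailing unclosed block exactly as A does).
import Mathlib
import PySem

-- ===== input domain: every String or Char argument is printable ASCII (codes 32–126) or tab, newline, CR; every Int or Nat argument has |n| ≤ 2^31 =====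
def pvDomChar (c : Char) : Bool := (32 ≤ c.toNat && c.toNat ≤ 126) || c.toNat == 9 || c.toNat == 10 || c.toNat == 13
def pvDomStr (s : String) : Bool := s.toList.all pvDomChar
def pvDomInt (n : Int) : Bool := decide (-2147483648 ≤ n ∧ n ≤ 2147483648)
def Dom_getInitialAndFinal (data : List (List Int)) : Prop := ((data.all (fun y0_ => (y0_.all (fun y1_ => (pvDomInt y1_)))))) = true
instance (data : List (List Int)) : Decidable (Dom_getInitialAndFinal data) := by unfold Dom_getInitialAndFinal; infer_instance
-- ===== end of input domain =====

-- B replaces A's single stateful mode-flag loop by comprehensions over the flag list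
-- zipped with its own shift, pairing starts with ends via zip truncation (objective: alternative).

-- ===== PORT A =====
-- the 'for i, elem in enumerate(data)' loop with state (aux, space, initial, final)
def pvAloop : List (List Int) → Int → List (Int × Int) → Bool → Int → Int → List (Int × Int)
  | [], _, aux, _, _, _ => aux
  | elem :: rest, i, aux, space, initial, final =>
      let sumElem : Int := elem.sum
      if space && (sumElem != 0) then
        pvAloop rest (i + 1) aux false (i - 2) final
      else if !space && (sumElem == 0) then
        pvAloop rest (i + 1) (aux ++ [(initial, i + 2)]) true initial (i + 2)
      else
        pvAloop rest (i + 1) aux space initial final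

def getInitialAndFinal (data : List (List Int)) : List (Int × Int) :=
  pvAloop data 0 [] true 0 0

-- ===== PORT B =====
def getInitialAndFinal_alt (data : List (List Int)) : List (Int × Int) :=
  let flags := data.map (fun e => e.sum != 0)
  let prevs := false :: flags.dropLast      -- [False] + flags[:-1]
  let pairs := prevs.zip flags
  let starts := (PySem.List.enumerate pairs).filterMap
    (fun q => if q.2.2 && !q.2.1 then some (q.1 - 2) else none)
  let ends := (PySem.List.enumerate pairs).filterMap
    (fun q => if q.2.1 && !q.2.2 then some (q.1 + 2) else none)
  starts.zip ends

-- ===== PRECONDITION & SPEC =====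
def Spec_getInitialAndFinal (data : List (List Int)) (out : List (Int × Int)) : Prop := out = getInitialAndFinal_alt data
instance (data : List (List Int)) (out : List (Int × Int)) : Decidable (Spec_getInitialAndFinal data out) := by unfold Spec_getInitialAndFinal; infer_instance

-- ===== CLAIM (what is proved, stated in full; the proofs are below) =====
def Claim_equal_getInitialAndFinal : Prop := ∀ (data : List (List Int)), Dom_getInitialAndFinal data → Spec_getInitialAndFinal data (getInitialAndFinal data)

-- ===== LEMMAS AND PROOFS =====

-- starts (resp. ends) of the non-empty blocks of a flag list, given the previous flag and current index
def pvS (p : Bool) (i : Int) : List Bool → List Int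
  | [] => []
  | f :: fs => if f && !p then (i - 2) :: pvS f (i + 1) fs else pvS f (i + 1) fs

def pvE (p : Bool) (i : Int) : List Bool → List Int
  | [] => []
  | f :: fs => if p && !f then (i + 2) :: pvE f (i + 1) fs else pvE f (i + 1) fs

-- B's comprehension over the shifted zip equals pvS / pvE
theorem pvS_eq : ∀ (fs : List Bool) (p : Bool) (i : Int),
    ((PySem.List.enumerate ((p :: fs.dropLast).zip fs) i).filterMap
      (fun q => if q.2.2 && !q.2.1 then some (q.1 - 2) else none)) = pvS p i fs := by
  intro fs
  induction fs with
  | nil => intro p i; simp [PySem.List.enumerate, pvS]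
  | cons f fs ih =>
    intro p i
    cases fs with
    | nil =>
      cases f <;> cases p <;>
        simp [PySem.List.enumerate_cons, pvS]
    | cons g gs =>
      have h : (p :: (f :: g :: gs).dropLast).zip (f :: g :: gs)
          = (p, f) :: ((f :: (g :: gs).dropLast).zip (g :: gs)) := by
        simp [List.dropLast]
      rw [h, PySem.List.enumerate_cons]
      simp only [List.filterMap_cons]
      rw [ih f (i + 1)]
      cases f <;> cases p <;> simp [pvS]

theorem pvE_eq : ∀ (fs : List Bool) (p : Bool) (i : Int),
    ((PySem.List.enumerate ((p :: fs.dropLast).zip fs) i).filterMap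
      (fun q => if q.2.1 && !q.2.2 then some (q.1 + 2) else none)) = pvE p i fs := by
  intro fs
  induction fs with
  | nil => intro p i; simp [PySem.List.enumerate, pvE]
  | cons f fs ih =>
    intro p i
    cases fs with
    | nil =>
      cases f <;> cases p <;>
        simp [PySem.List.enumerate_cons, pvE]
    | cons g gs =>
      have h : (p :: (f :: g :: gs).dropLast).zip (f :: g :: gs)
          = (p, f) :: ((f :: (g :: gs).dropLast).zip (g :: gs)) := by
        simp [List.dropLast]
      rw [h, PySem.List.enumerate_cons]
      simp only [List.filterMap_cons]
      rw [ih f (i + 1)]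
      cases f <;> cases p <;> simp [pvE]

-- A's loop computes aux ++ the zip of pending/remaining starts with remaining ends
theorem pvAloop_eq : ∀ (data : List (List Int)) (i : Int) (aux : List (Int × Int))
    (space : Bool) (initial final : Int),
    pvAloop data i aux space initial final =
      aux ++ (if space then
                (pvS false i (data.map (fun e => e.sum != 0))).zip
                  (pvE false i (data.map (fun e => e.sum != 0)))
              else
                (initial :: pvS true i (data.map (fun e => e.sum != 0))).zip
                  (pvE true i (data.map (fun e => e.sum != 0)))) := by
  intro data
  induction data with
  | nil => intro i aux space initial final; cases space <;> simp [pvAloop, pvS, pvE]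
  | cons elem rest ih =>
    intro i aux space initial final
    by_cases hf : elem.sum = 0
    · have hb : (elem.sum != 0) = false := by simp [hf]
      cases space <;>
        simp [pvAloop, hf, pvS, pvE, ih, List.append_assoc]
    · have hb : (elem.sum != 0) = true := by simp [hf]
      cases space <;>
        simp [pvAloop, hf, hb, pvS, pvE, ih]

-- ===== VERDICT (by name: the statement is the Claim_ definition above) =====
theorem getInitialAndFinal_spec : Claim_equal_getInitialAndFinal := by
  intro data _
  unfold Spec_getInitialAndFinal getInitialAndFinal getInitialAndFinal_alt
  rw [pvAloop_eq]
  simp only [pvS_eq, pvE_eq, List.nil_append, if_true]
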